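-- pv_equiv track=rewrite | github.com/kaijfox/blscale-loader | blscale_loader/io.py | get_groups_dict
-- ===== SOURCE A (Python) =====
-- def get_groups_dict(metadata_val):
--     """
--     Parameters
--     ----------
--     metadata_val : dict
--         Mapping session names to metadata values
--     """
--     groups = {}
--     for sess_name, val in metadata_val.items():
--         if val not in groups:
--             groups[val] = []
--         groups[val].append(sess_name)
--     sorted_keys = sorted(groups.keys())
--     return sorted_keys, tuple(groups[k] for k in sorted_keys)
-- ===== SOURCE B (Python) =====
-- def get_groups_dict(metadata_val):
--     keys = sorted(set(metadata_val.values()))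
--     return keys, tuple([s for s, v in metadata_val.items() if v == k] for k in keys)
-- ===== Notes on version B (the rewrite author's own statement) =====
-- stated objective: simpler
-- what changed: Replaces the dict-building grouping pass with sorting the distinct metadata values once and collecting each group by a per-key filter comprehension; no dict is maintained.
import Mathlib
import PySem

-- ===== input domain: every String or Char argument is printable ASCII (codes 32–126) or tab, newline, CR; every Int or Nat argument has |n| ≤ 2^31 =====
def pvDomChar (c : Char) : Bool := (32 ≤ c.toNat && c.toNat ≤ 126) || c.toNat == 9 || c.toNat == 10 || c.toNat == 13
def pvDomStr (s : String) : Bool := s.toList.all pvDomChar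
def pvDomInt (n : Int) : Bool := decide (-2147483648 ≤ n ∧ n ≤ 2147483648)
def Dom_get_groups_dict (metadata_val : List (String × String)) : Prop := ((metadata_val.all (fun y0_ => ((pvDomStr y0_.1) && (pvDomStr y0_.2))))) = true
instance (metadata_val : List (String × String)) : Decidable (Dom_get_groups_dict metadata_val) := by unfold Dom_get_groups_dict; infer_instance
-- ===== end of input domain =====

-- B replaces A's dict-building grouping pass by sorting the distinct values once and
-- collecting each group with a per-key filter; objective: simpler (no speed claim).


-- ===== PORT A =====
-- loop body: 'if val not in groups: groups[val] = []' then 'groups[val].append(sess_name)'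
def pvStepA (g : PySem.Dict String (List String)) (p : String × String) : PySem.Dict String (List String) :=
  let g' := if g.contains p.2 then g else g.insert p.2 []
  g'.modify p.2 [] (fun l => l ++ [p.1])

def get_groups_dict (metadata_val : List (String × String)) : List String × List (List String) :=
  let groups := metadata_val.foldl pvStepA PySem.Dict.empty
  let sorted_keys := PySem.List.sorted groups.keys (fun x => x) false
  (sorted_keys, sorted_keys.map (fun k => groups.getD k []))

-- ===== PORT B =====
def get_groups_dict_alt (metadata_val : List (String × String)) : List String × List (List String) :=
  let keys := PySem.List.sorted (PySem.Set.ofList (metadata_val.map (·.2))) (fun x => x) false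
  (keys, keys.map (fun k => (metadata_val.filter (fun p => p.2 == k)).map (·.1)))

-- ===== PRECONDITION & SPEC =====
def Spec_get_groups_dict (metadata_val : List (String × String)) (out : List String × List (List String)) : Prop := out = get_groups_dict_alt metadata_val
instance (metadata_val : List (String × String)) (out : List String × List (List String)) : Decidable (Spec_get_groups_dict metadata_val out) := by unfold Spec_get_groups_dict; infer_instance

-- ===== CLAIM (what is proved, stated in full; the proofs are below) =====
def Claim_equal_get_groups_dict : Prop := ∀ (metadata_val : List (String × String)), Dom_get_groups_dict metadata_val → Spec_get_groups_dict metadata_val (get_groups_dict metadata_val)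

-- ===== LEMMAS AND PROOFS =====

-- one step of A's loop, seen through getD: append p.1 to the group of p.2
theorem pv_getD_step (d : PySem.Dict String (List String)) (p : String × String) (c : String) :
    (pvStepA d p).getD c [] = if p.2 == c then d.getD c [] ++ [p.1] else d.getD c [] := by
  obtain ⟨a, v⟩ := p
  simp only [pvStepA]
  by_cases hc : c = v
  · rw [hc]
    simp only [beq_self_eq_true, if_true]
    by_cases h : d.contains v = true
    · simp [h, PySem.Dict.getD_modify_self]
    · have h' : d.contains v = false := by simpa using h
      rw [if_neg h, PySem.Dict.getD_modify_self, PySem.Dict.getD_insert_self,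
        PySem.Dict.getD_of_not_contains _ _ h']
  · have hne : (v == c) = false := by
      simpa using fun h : v = c => hc h.symm
    simp only [hne, Bool.false_eq_true, if_false]
    by_cases h : d.contains v = true
    · rw [if_pos h, PySem.Dict.getD_modify_of_ne _ _ _ hc]
    · rw [if_neg h, PySem.Dict.getD_modify_of_ne _ _ _ hc,
        PySem.Dict.getD_insert_of_ne _ _ _ hc]

-- one step of A's loop, seen through keys: add p.2 to the running set of values
theorem pv_keys_step (d : PySem.Dict String (List String)) (p : String × String) :
    (pvStepA d p).keys = PySem.Set.add d.keys p.2 := by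
  obtain ⟨a, v⟩ := p
  simp only [pvStepA]
  by_cases h : d.contains v = true
  · have hm : v ∈ d.keys := (PySem.Dict.contains_iff_mem_keys d v).mp h
    rw [if_pos h, PySem.Dict.keys_modify, PySem.Dict.keys_insert_of_contains _ _ h]
    simp [PySem.Set.add, PySem.Set.contains, hm]
  · have h' : d.contains v = false := by simpa using h
    have hm : v ∉ d.keys := fun hmem => by
      simp [(PySem.Dict.contains_iff_mem_keys d v).mpr hmem] at h'
    rw [if_neg h, PySem.Dict.keys_modify,
      PySem.Dict.keys_insert_of_contains _ _ (PySem.Dict.contains_insert_self d v []),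
      PySem.Dict.keys_insert_of_not_contains _ _ h']
    simp [PySem.Set.add, PySem.Set.contains, hm]

-- the keys of A's loop state are the running set of values seen so far
theorem pv_keys_foldl (l : List (String × String)) (d : PySem.Dict String (List String)) :
    (l.foldl pvStepA d).keys = PySem.Set.update d.keys (l.map (·.2)) := by
  induction l generalizing d with
  | nil => rfl
  | cons p l ih =>
    rw [List.foldl_cons, ih, List.map_cons, pv_keys_step]
    rfl

-- the group stored at c after A's loop is the filtered session names
theorem pv_getD_foldl (l : List (String × String)) (d : PySem.Dict String (List String)) (c : String) :
    (l.foldl pvStepA d).getD c [] = d.getD c [] ++ (l.filter (fun p => p.2 == c)).map (·.1) := by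
  induction l generalizing d with
  | nil => simp
  | cons p l ih =>
    rw [List.foldl_cons, ih, pv_getD_step, List.filter_cons]
    by_cases hpc : (p.2 == c) = true
    · simp [hpc]
    · have hpc' : (p.2 == c) = false := by simpa using hpc
      simp [hpc']
-- ===== VERDICT (by name: the statement is the Claim_ definition above) =====
theorem get_groups_dict_spec : Claim_equal_get_groups_dict := by
  intro mv _
  show _ = _
  unfold get_groups_dict get_groups_dict_alt
  have hkeys : (mv.foldl pvStepA PySem.Dict.empty).keys = PySem.Set.ofList (mv.map (·.2)) := by
    rw [pv_keys_foldl, PySem.Set.ofList_eq_foldl]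
    rfl
  simp only [hkeys]
  refine Prod.ext rfl ?_
  apply List.map_congr_left
  intro k _
  rw [pv_getD_foldl]
  simp
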